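-- pv_equiv track=rewrite | github.com/pinellolab/CRISPRlungo | CRISPRlungo.py | getLeftRightMismatchesMDZ
-- ===== SOURCE A (Python) =====
-- def getLeftRightMismatchesMDZ(mdz_str):
--     """
--     Gets the number of mismates on the left and right of an alignment from the MD:Z string
--
--     From the Samtool spec:
--
--     The MD string consists of the following items, concatenated without additional delimiter characters:
--       [0-9]+, indicating a run of reference bases that are identical to the corresponding SEQ bases;
--       [A-Z], identifying a single reference base that differs from the SEQ base aligned at that position;
--       \^[A-Z]+, identifying a run of reference bases that have been deleted in the alignment.
--
--     params:
--         mdz_str: MD:Z string from alignment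
--
--     returns:
--         left_matches: number of bp that match on the left side of the alignment
--         right_matches
--    """
--     num_set = set([str(x) for x in range(10)])
--     left_matches = 0
--     curr_num_str = ""
--     for str_index in range(len(mdz_str)):
--         if mdz_str[str_index] in num_set:
--             curr_num_str += mdz_str[str_index]
--         else:
--             break
--
--     if curr_num_str == '':
--         left_matches = 0
--     else:
--         left_matches = int(curr_num_str)
--
--     right_matches = 0
--     curr_num_str = ""
--     for str_index in range(len(mdz_str)-1,-1,-1):
--         if mdz_str[str_index] in num_set:
--             curr_num_str = mdz_str[str_index] + curr_num_str
--         else: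
--             break
--
--     if curr_num_str == '':
--         right_matches = 0
--     else:
--         right_matches = int(curr_num_str)
--
--     return left_matches,right_matches
-- ===== SOURCE B (Python) =====
-- _DIGITS = '0123456789'
--
-- def getLeftRightMismatchesMDZ(mdz_str):
--     left_run = mdz_str[:len(mdz_str) - len(mdz_str.lstrip(_DIGITS))]
--     right_run = mdz_str[len(mdz_str.rstrip(_DIGITS)):]
--     return (int(left_run) if left_run else 0,
--             int(right_run) if right_run else 0)
-- ===== Notes on version B (the rewrite author's own statement) =====
-- stated objective: simpler
-- what changed: Replaces A's two manual index loops with break and accumulator strings by lstrip/rstrip of the digit characters plus slicing: the leading run is the part lstrip removed, the trailing run the part rstrip removed, each converted with int (0 if empty).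
import Mathlib
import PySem

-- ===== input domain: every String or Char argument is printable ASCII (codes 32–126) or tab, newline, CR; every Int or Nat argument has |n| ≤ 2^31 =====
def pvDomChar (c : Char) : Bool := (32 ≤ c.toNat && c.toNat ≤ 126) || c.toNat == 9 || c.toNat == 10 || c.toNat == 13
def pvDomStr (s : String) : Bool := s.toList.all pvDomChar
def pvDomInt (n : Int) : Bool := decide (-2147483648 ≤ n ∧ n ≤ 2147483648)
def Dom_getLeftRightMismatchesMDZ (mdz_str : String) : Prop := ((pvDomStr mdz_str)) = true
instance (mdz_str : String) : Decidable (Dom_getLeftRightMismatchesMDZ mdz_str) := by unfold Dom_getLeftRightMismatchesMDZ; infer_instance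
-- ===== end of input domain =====

-- B replaces A's two manual index loops (with break) by lstrip/rstrip of the digit
-- characters plus slicing ('simpler': no explicit loops, no accumulator strings).

-- ===== PORT A =====
-- num_set = set([str(x) for x in range(10)]) = the ten one-character digit strings;
-- membership of the one-character string mdz_str[i] is ported as Char membership.
def pvNumSet : List Char := PySem.Set.ofList ['0','1','2','3','4','5','6','7','8','9']

-- the first loop: walk the characters left to right, appending digits to curr_num_str, break at the first non-digit
def pvScanLeft : List Char → List Char → List Char
  | [], acc => acc
  | c :: rest, acc => if pvNumSet.contains c then pvScanLeft rest (acc ++ [c]) else acc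

-- the second loop: str_index from len-1 down to 0 (i.e. over the reversed list), PREPENDING digits, break at the first non-digit
def pvScanRight : List Char → List Char → List Char
  | [], acc => acc
  | c :: rest, acc => if pvNumSet.contains c then pvScanRight rest (c :: acc) else acc

def getLeftRightMismatchesMDZ (mdz_str : String) : Int × Int :=
  let cs := mdz_str.toList
  let leftAcc := pvScanLeft cs []
  -- int(curr_num_str): only reached with curr_num_str nonempty and all digits, where int() returns
  let left_matches : Int := if leftAcc = [] then 0 else (PySem.Int.ofChars? leftAcc).getD 0
  let rightAcc := pvScanRight cs.reverse []
  let right_matches : Int := if rightAcc = [] then 0 else (PySem.Int.ofChars? rightAcc).getD 0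
  (left_matches, right_matches)

-- ===== PORT B =====
def pvDigitChars : List Char := "0123456789".toList

-- s.lstrip(chars) / s.rstrip(chars): PySem has no chars-argument one-sided strip, so they are
-- ported by hand, exactly as CPython: drop the run of chars from the left (resp. right).
def pvLstripChars (cs : List Char) : List Char := cs.dropWhile (fun c => pvDigitChars.contains c)
def pvRstripChars (cs : List Char) : List Char := ((cs.reverse).dropWhile (fun c => pvDigitChars.contains c)).reverse

def getLeftRightMismatchesMDZ_alt (mdz_str : String) : Int × Int :=
  let cs := mdz_str.toList
  let left_run := cs.take (cs.length - (pvLstripChars cs).length)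
  let right_run := cs.drop (pvRstripChars cs).length
  (if left_run = [] then 0 else (PySem.Int.ofChars? left_run).getD 0,
   if right_run = [] then 0 else (PySem.Int.ofChars? right_run).getD 0)

-- ===== PRECONDITION & SPEC =====
def Spec_getLeftRightMismatchesMDZ (mdz_str : String) (out : Int × Int) : Prop := out = getLeftRightMismatchesMDZ_alt mdz_str
instance (mdz_str : String) (out : Int × Int) : Decidable (Spec_getLeftRightMismatchesMDZ mdz_str out) := by unfold Spec_getLeftRightMismatchesMDZ; infer_instance

-- ===== CLAIM (what is proved, stated in full; the proofs are below) =====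
def Claim_equal_getLeftRightMismatchesMDZ : Prop := ∀ (mdz_str : String), Dom_getLeftRightMismatchesMDZ mdz_str → Spec_getLeftRightMismatchesMDZ mdz_str (getLeftRightMismatchesMDZ mdz_str)

-- ===== LEMMAS AND PROOFS =====

theorem pvTake_aux (l l1 l2 : List Char) (h : l = l1 ++ l2) :
    l.take (l.length - l2.length) = l1 := by
  subst h; rw [List.length_append, Nat.add_sub_cancel, List.take_left]

theorem pvDrop_aux (l l1 l2 : List Char) (h : l = l1 ++ l2) :
    l.drop l1.length = l2 := by
  subst h; rw [List.drop_left]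

theorem pvScanLeft_eq (l acc : List Char) :
    pvScanLeft l acc = acc ++ l.takeWhile (fun c => pvNumSet.contains c) := by
  induction l generalizing acc with
  | nil => simp [pvScanLeft]
  | cons c rest ih =>
    rw [pvScanLeft, List.takeWhile_cons]
    cases h : pvNumSet.contains c with
    | true => rw [if_pos rfl, if_pos rfl, ih, List.append_assoc, List.singleton_append]
    | false => rw [if_neg (by simp), if_neg (by simp), List.append_nil]

theorem pvScanRight_eq (l acc : List Char) :
    pvScanRight l acc = (l.takeWhile (fun c => pvNumSet.contains c)).reverse ++ acc := by
  induction l generalizing acc with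
  | nil => simp [pvScanRight]
  | cons c rest ih =>
    rw [pvScanRight, List.takeWhile_cons]
    cases h : pvNumSet.contains c with
    | true =>
      rw [if_pos rfl, if_pos rfl, ih, List.reverse_cons, List.append_assoc,
        List.singleton_append]
    | false => rw [if_neg (by simp), if_neg (by simp), List.reverse_nil, List.nil_append]

theorem pvDigitChars_eq : pvDigitChars = pvNumSet := by decide

theorem pvLeftRun_eq (cs : List Char) :
    cs.take (cs.length - (pvLstripChars cs).length)
      = cs.takeWhile (fun c => pvNumSet.contains c) := by
  unfold pvLstripChars
  rw [pvDigitChars_eq]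
  exact pvTake_aux _ _ _ (List.takeWhile_append_dropWhile (p := fun c => pvNumSet.contains c) (l := cs)).symm

theorem pvRightRun_eq (cs : List Char) :
    cs.drop (pvRstripChars cs).length
      = ((cs.reverse).takeWhile (fun c => pvNumSet.contains c)).reverse := by
  unfold pvRstripChars
  rw [pvDigitChars_eq]
  exact pvDrop_aux _ _ _ (by
    rw [← List.reverse_append, List.takeWhile_append_dropWhile, List.reverse_reverse])

-- ===== VERDICT (by name: the statement is the Claim_ definition above) =====
theorem getLeftRightMismatchesMDZ_spec : Claim_equal_getLeftRightMismatchesMDZ := by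
  intro s _
  unfold Spec_getLeftRightMismatchesMDZ getLeftRightMismatchesMDZ getLeftRightMismatchesMDZ_alt
  simp only [pvScanLeft_eq, pvScanRight_eq, List.nil_append, List.append_nil,
    pvLeftRun_eq, pvRightRun_eq]
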